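-- pv_equiv track=rewrite | github.com/Boyd220/InzichtInBeleid | get_data_nieuwkoop.py | replacemonth
-- ===== SOURCE A (Python) =====
-- def replacemonth(string):
--     for r in (("januari", "January"),
--           ("februari", "February"),
--           ("maart", "March"),
--           ("april", "April"),
--           ("mei", "May"),
--           ("juni", "June"),
--           ("juli", "July"),
--           ("augustus", "August"),
--           ("september", "September"),
--           ("oktober", "October"),
--           ("november", "November"),
--           ("december", "December")):
--         string = string.replace(*r)
--     return string
-- ===== SOURCE B (Python) =====
-- import re
--
-- _MONTHS = {"januari": "January", "februari": "February", "maart": "March",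
--            "april": "April", "mei": "May", "juni": "June", "juli": "July",
--            "augustus": "August", "september": "September", "oktober": "October",
--            "november": "November", "december": "December"}
--
-- _PATTERN = re.compile("|".join(_MONTHS))
--
--
-- def replacemonth(string):
--     return _PATTERN.sub(lambda m: _MONTHS[m.group(0)], string)
-- ===== Notes on version B (the rewrite author's own statement) =====
-- stated objective: idiomatic
-- what changed: A makes twelve sequential full-string .replace passes; B builds a month dict once and does a single left-to-right pass with one compiled regex alternation whose replacement function looks each match up in the dict.
import Mathlib
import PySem

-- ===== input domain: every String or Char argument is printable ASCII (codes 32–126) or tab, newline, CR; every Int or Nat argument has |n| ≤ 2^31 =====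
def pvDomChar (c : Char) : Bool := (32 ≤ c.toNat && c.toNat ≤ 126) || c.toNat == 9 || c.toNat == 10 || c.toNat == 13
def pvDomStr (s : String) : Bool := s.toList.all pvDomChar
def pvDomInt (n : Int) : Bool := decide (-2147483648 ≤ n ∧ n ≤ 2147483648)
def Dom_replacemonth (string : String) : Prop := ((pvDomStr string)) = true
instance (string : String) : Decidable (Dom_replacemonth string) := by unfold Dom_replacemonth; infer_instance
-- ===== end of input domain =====

-- B replaces A's twelve sequential full-string `.replace` passes by ONE left-to-right scan
-- (a compiled regex alternation with a dict lookup per match); same twelve mappings, same result.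

-- ===== PORT A =====
-- A's tuple of (dutch, english) pairs, in A's order
def pvMonthsA : List (String × String) :=
  [("januari", "January"), ("februari", "February"), ("maart", "March"),
   ("april", "April"), ("mei", "May"), ("juni", "June"), ("juli", "July"),
   ("augustus", "August"), ("september", "September"), ("oktober", "October"),
   ("november", "November"), ("december", "December")]

-- for r in (...): string = string.replace(*r)
def replacemonth (string : String) : String :=
  pvMonthsA.foldl (fun s r => PySem.Str.replace s r.1 r.2) string

-- ===== PORT B =====
-- B's dict _MONTHS as an association list (insertion order)
def pvMonthsB : List (String × String) :=
  [("januari", "January"), ("februari", "February"), ("maart", "March"),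
   ("april", "April"), ("mei", "May"), ("juni", "June"), ("juli", "July"),
   ("augustus", "August"), ("september", "September"), ("oktober", "October"),
   ("november", "November"), ("december", "December")]

-- _PATTERN.sub(lambda m: _MONTHS[m.group(0)], string): one left-to-right scan; at each
-- position the regex alternation tries the twelve keys in pattern order, replaces the first
-- match by its dict value and resumes after it, else emits the character and moves on.
-- (fuel = remaining length bounds the scan; it never runs out, every key is nonempty)
def pvSubGo (tab : List (List Char × List Char)) : Nat → List Char → List Char
  | _, [] => []
  | 0, l => l
  | fuel + 1, c :: t =>
    match tab.find? (fun p => p.1.isPrefixOf (c :: t)) with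
    | some (q, e) => e ++ pvSubGo tab fuel ((c :: t).drop q.length)
    | none => c :: pvSubGo tab fuel t

def replacemonth_alt (string : String) : String :=
  String.ofList
    (pvSubGo (pvMonthsB.map (fun r => (r.1.toList, r.2.toList)))
      string.toList.length string.toList)

-- ===== PRECONDITION & SPEC =====
def Spec_replacemonth (string : String) (out : String) : Prop := out = replacemonth_alt string
instance (string : String) (out : String) : Decidable (Spec_replacemonth string out) := by unfold Spec_replacemonth; infer_instance

-- ===== CLAIM (what is proved, stated in full; the proofs are below) =====
def Claim_equal_replacemonth : Prop := ∀ (string : String), Dom_replacemonth string → Spec_replacemonth string (replacemonth string)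

-- ===== LEMMAS AND PROOFS =====

-- spec version of one `str.replace` pass (well-founded, no fuel/accumulator)
def pvRep (old new : List Char) : List Char → List Char
  | [] => []
  | c :: t =>
    if h : old ≠ [] ∧ old.isPrefixOf (c :: t) then new ++ pvRep old new ((c :: t).drop old.length)
    else c :: pvRep old new t
termination_by l => l.length
decreasing_by
  · simp only [List.length_drop, List.length_cons]
    have : old.length ≥ 1 := List.length_pos_iff.mpr h.1
    omega
  · simp

-- spec version of the multi-pattern scan (well-founded, no fuel)
def pvMsc (tab : List (List Char × List Char)) : List Char → List Char
  | [] => []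
  | c :: t =>
    match tab.find? (fun p => p.1.isPrefixOf (c :: t)) with
    | some (q, e) =>
      if h : q = [] then c :: pvMsc tab t
      else e ++ pvMsc tab ((c :: t).drop q.length)
    | none => c :: pvMsc tab t
termination_by l => l.length
decreasing_by
  all_goals simp only [List.length_drop, List.length_cons]
  all_goals try omega
  all_goals (have : q.length ≥ 1 := List.length_pos_iff.mpr ‹q ≠ []›; omega)

theorem pvGo_eq_rep (old new : List Char) (hold : old ≠ []) :
    ∀ (fuel : Nat) (l acc : List Char), l.length ≤ fuel →
      PySem.Chars.replace.go old new fuel l acc = acc.reverse ++ pvRep old new l := by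
  intro fuel
  induction fuel with
  | zero =>
    intro l acc hl
    have : l = [] := List.eq_nil_of_length_eq_zero (Nat.le_zero.mp hl)
    subst this
    rw [PySem.Chars.replace.go, pvRep]
  | succ n ih =>
    intro l acc hl
    cases l with
    | nil =>
      rw [PySem.Chars.replace.go, pvRep]
      · simp
      · omega
    | cons c t =>
      rw [PySem.Chars.replace.go]
      by_cases hpre : old.isPrefixOf (c :: t) = true
      · simp only [hpre, if_true]
        have hlen : ((c :: t).drop old.length).length ≤ n := by
          have : old.length ≥ 1 := List.length_pos_iff.mpr hold
          simp only [List.length_drop, List.length_cons]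
          simp only [List.length_cons] at hl
          omega
        rw [ih _ _ hlen, pvRep]
        rw [dif_pos ⟨hold, hpre⟩]
        simp
      · simp only [hpre]
        have hlen : t.length ≤ n := by simp only [List.length_cons] at hl; omega
        rw [ih _ _ hlen, pvRep]
        rw [dif_neg (by simp [hpre])]
        simp

theorem pvReplace_eq_rep (old new l : List Char) (hold : old ≠ []) :
    PySem.Chars.replace l old new = pvRep old new l := by
  rw [PySem.Chars.replace]
  rw [if_neg (by simp [hold]), pvGo_eq_rep old new hold l.length l [] le_rfl]
  simp

theorem pvSubGo_eq_msc (tab : List (List Char × List Char)) (htab : ∀ p ∈ tab, p.1 ≠ []) :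
    ∀ (fuel : Nat) (l : List Char), l.length ≤ fuel → pvSubGo tab fuel l = pvMsc tab l := by
  intro fuel
  induction fuel with
  | zero =>
    intro l hl
    have : l = [] := List.eq_nil_of_length_eq_zero (Nat.le_zero.mp hl)
    subst this
    rw [pvSubGo, pvMsc]
  | succ n ih =>
    intro l hl
    cases l with
    | nil => rw [pvSubGo, pvMsc]
    | cons c t =>
      rw [pvSubGo, pvMsc]
      cases hf : tab.find? (fun p => p.1.isPrefixOf (c :: t)) with
      | none =>
        have hlen : t.length ≤ n := by simp only [List.length_cons] at hl; omega
        simp only [ih _ hlen]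
      | some qe =>
        obtain ⟨q, e⟩ := qe
        have hq : q ≠ [] := htab (q, e) (List.mem_of_find?_eq_some hf)
        simp only
        rw [dif_neg hq]
        have hlen : ((c :: t).drop q.length).length ≤ n := by
          have : q.length ≥ 1 := List.length_pos_iff.mpr hq
          simp only [List.length_drop, List.length_cons]
          simp only [List.length_cons] at hl
          omega
        rw [ih _ hlen]

theorem pvMsc_nil_tab (s : List Char) : pvMsc [] s = s := by
  induction s with
  | nil => rw [pvMsc]
  | cons c t ih => rw [pvMsc]; simp [ih]

theorem pvRep_append (old new a w : List Char)
    (h : ∀ i < a.length, ¬ old <+: (a.drop i ++ w)) :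
    pvRep old new (a ++ w) = a ++ pvRep old new w := by
  induction a with
  | nil => simp
  | cons c a' ih =>
    have h0 : ¬ old <+: (c :: a' ++ w) := by
      have := h 0 (by simp)
      simpa using this
    rw [List.cons_append, pvRep, dif_neg (by
      rintro ⟨-, hp⟩
      exact h0 (List.isPrefixOf_iff_prefix.mp hp))]
    rw [ih (fun i hi => by
      have := h (i + 1) (by simpa using Nat.succ_lt_succ hi)
      simpa using this)]
    simp

theorem pvMsc_append (tab : List (List Char × List Char)) (a w : List Char)
    (h : ∀ j < a.length, ∀ p ∈ tab, ¬ p.1 <+: (a.drop j ++ w)) :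
    pvMsc tab (a ++ w) = a ++ pvMsc tab w := by
  induction a with
  | nil => simp
  | cons c a' ih =>
    have hf : tab.find? (fun p => p.1.isPrefixOf (c :: (a' ++ w))) = none := by
      rw [List.find?_eq_none]
      intro p hp
      have := h 0 (by simp) p hp
      simpa using fun hx => this (List.isPrefixOf_iff_prefix.mp hx)
    rw [List.cons_append, pvMsc, hf]
    simp only
    rw [ih (fun j hj p hp => by
      have := h (j + 1) (by simpa using Nat.succ_lt_succ hj) p hp
      simpa using this)]
    simp

theorem pvMsc_prefix_low (tab : List (List Char × List Char))
    (h1 : ∀ p ∈ tab, p.1 ≠ [])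
    (h2 : ∀ p ∈ tab, p.2.head?.any (fun c => !c.isLower) = true) :
    ∀ (s v : List Char), (∀ c ∈ v, c.isLower = true) → v <+: pvMsc tab s → v <+: s := by
  have main : ∀ (n : Nat) (s : List Char), s.length ≤ n →
      ∀ v : List Char, (∀ c ∈ v, c.isLower = true) → v <+: pvMsc tab s → v <+: s := by
    intro n
    induction n with
    | zero =>
      intro s hs
      have : s = [] := List.eq_nil_of_length_eq_zero (Nat.le_zero.mp hs)
      subst this
      rw [pvMsc]
      exact fun v _ hv => hv
    | succ n ih =>
      intro s hs v hvlow hv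
      cases s with
      | nil => rwa [pvMsc] at hv
      | cons c t =>
        rw [pvMsc] at hv
        cases hf : tab.find? (fun p => p.1.isPrefixOf (c :: t)) with
        | some qe =>
          obtain ⟨q, e⟩ := qe
          have hmem := List.mem_of_find?_eq_some hf
          have hq : q ≠ [] := h1 (q, e) hmem
          rw [hf] at hv
          simp only [dif_neg hq] at hv
          cases v with
          | nil => exact List.nil_prefix
          | cons d v' =>
            exfalso
            have he := h2 (q, e) hmem
            cases e with
            | nil => simp at he
            | cons c0 e' =>
              simp only [List.head?_cons, Option.any_some, Bool.not_eq_eq_eq_not, Bool.not_true] at he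
              rw [List.cons_append, List.cons_prefix_cons] at hv
              have : d.isLower = true := hvlow d (by simp)
              rw [hv.1] at this
              simp_all
        | none =>
          rw [hf] at hv
          cases v with
          | nil => exact List.nil_prefix
          | cons d v' =>
            rw [List.cons_prefix_cons] at hv
            have hlen : t.length ≤ n := by simp only [List.length_cons] at hs; omega
            have := ih t hlen v' (fun ch hch => hvlow ch (by simp [hch])) hv.2
            exact List.cons_prefix_cons.mpr ⟨hv.1, this⟩
  exact fun s => main s.length s le_rfl

-- one replace pass over `old ++ w` fires at the head
theorem pvRep_head_match (old new w : List Char) (hold : old ≠ []) :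
    pvRep old new (old ++ w) = new ++ pvRep old new w := by
  cases old with
  | nil => exact absurd rfl hold
  | cons c o' =>
    rw [List.cons_append, pvRep, dif_pos ⟨hold, List.isPrefixOf_iff_prefix.mpr
      (by rw [← List.cons_append]; exact List.prefix_append _ _)⟩]
    rw [← List.cons_append, List.drop_left]

-- all the interaction facts one appended pattern needs against the earlier table rows
def pvGoodStep (L : List (List Char × List Char)) (p : List Char) : Prop :=
  p ≠ [] ∧ (∀ c ∈ p, c.isLower = true) ∧
  ∀ q ∈ L, q.1 ≠ [] ∧ q.2.head?.any (fun c => !c.isLower) = true ∧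
    (∀ i < q.2.length, ¬ p <+: q.2.drop i ∧ ¬ q.2.drop i <+: p) ∧
    (∀ j < p.length, 1 ≤ j → ¬ q.1 <+: p.drop j ∧ ¬ p.drop j <+: q.1)

-- boolean mirror of pvGoodStep, so the twelve concrete instances can be checked by `decide`
def pvGoodStepB (L : List (List Char × List Char)) (p : List Char) : Bool :=
  !p.isEmpty && p.all (fun c => c.isLower) &&
  L.all (fun q =>
    !q.1.isEmpty && q.2.head?.any (fun c => !c.isLower) &&
    (List.range q.2.length).all
      (fun i => !(p.isPrefixOf (q.2.drop i)) && !((q.2.drop i).isPrefixOf p)) &&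
    (List.range p.length).all
      (fun j => (j == 0) || (!(q.1.isPrefixOf (p.drop j)) && !((p.drop j).isPrefixOf q.1))))

theorem pvGoodStep_of_b (L : List (List Char × List Char)) (p : List Char)
    (h : pvGoodStepB L p = true) : pvGoodStep L p := by
  unfold pvGoodStepB at h
  unfold pvGoodStep
  simp only [Bool.and_eq_true, List.all_eq_true, List.mem_range, Bool.or_eq_true,
    Bool.not_eq_eq_eq_not, Bool.not_true, List.isEmpty_eq_false_iff, beq_iff_eq] at h ⊢
  obtain ⟨⟨h1, h2⟩, h3⟩ := h
  refine ⟨h1, h2, fun q hq => ?_⟩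
  obtain ⟨⟨⟨hq1, hq2⟩, hq3⟩, hq4⟩ := h3 q hq
  refine ⟨hq1, hq2, fun i hi => ?_, fun j hj hj1 => ?_⟩
  · have := hq3 i hi
    constructor
    · intro hc; rw [List.isPrefixOf_iff_prefix.mpr hc] at this; simp at this
    · intro hc; rw [List.isPrefixOf_iff_prefix.mpr hc] at this; simp at this
  · have := hq4 j hj
    rcases this with h0 | hcc
    · omega
    · constructor
      · intro hc; rw [List.isPrefixOf_iff_prefix.mpr hc] at hcc; simp at hcc
      · intro hc; rw [List.isPrefixOf_iff_prefix.mpr hc] at hcc; simp at hcc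

theorem pvStep (L : List (List Char × List Char)) (p r : List Char)
    (hg : pvGoodStep L p) :
    ∀ s : List Char, pvRep p r (pvMsc L s) = pvMsc (L ++ [(p, r)]) s := by
  obtain ⟨hp, hplow, hL⟩ := hg
  have main : ∀ (n : Nat) (s : List Char), s.length ≤ n →
      pvRep p r (pvMsc L s) = pvMsc (L ++ [(p, r)]) s := by
    intro n
    induction n with
    | zero =>
      intro s hs
      have : s = [] := List.eq_nil_of_length_eq_zero (Nat.le_zero.mp hs)
      subst this
      rw [pvMsc, pvMsc, pvRep]
    | succ n ih =>
      intro s hs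
      cases s with
      | nil => rw [pvMsc, pvMsc, pvRep]
      | cons c t =>
        cases hf : L.find? (fun pr => pr.1.isPrefixOf (c :: t)) with
        | some qe =>
          obtain ⟨q, e⟩ := qe
          have hmem := List.mem_of_find?_eq_some hf
          obtain ⟨hq1, hq2, hocc, hovl⟩ := hL (q, e) hmem
          have hLHS : pvMsc L (c :: t) = e ++ pvMsc L ((c :: t).drop q.length) := by
            rw [pvMsc, hf]; simp only [dif_neg hq1]
          have hRHS : pvMsc (L ++ [(p, r)]) (c :: t)
              = e ++ pvMsc (L ++ [(p, r)]) ((c :: t).drop q.length) := by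
            rw [pvMsc, List.find?_append, hf]
            simp only [Option.some_or, dif_neg hq1]
          rw [hLHS, hRHS]
          rw [pvRep_append p r e _ (by
            intro i hi hcon
            rcases List.prefix_or_prefix_of_prefix hcon (List.prefix_append _ _) with h' | h'
            · exact (hocc i hi).1 h'
            · exact (hocc i hi).2 h')]
          have hlen : ((c :: t).drop q.length).length ≤ n := by
            have : q.length ≥ 1 := List.length_pos_iff.mpr hq1
            simp only [List.length_drop, List.length_cons]
            simp only [List.length_cons] at hs
            omega
          rw [ih _ hlen]
        | none =>
          have hnone : ∀ pr ∈ L, ¬ pr.1 <+: (c :: t) := by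
            intro pr hpr hcon
            have := List.find?_eq_none.mp hf pr hpr
            simp [List.isPrefixOf_iff_prefix, hcon] at this
          by_cases hps : p <+: c :: t
          · obtain ⟨z, hz⟩ := hps
            have hmA : pvMsc L (c :: t) = p ++ pvMsc L z := by
              rw [← hz]
              apply pvMsc_append
              intro j hj pr hpr hcon
              rcases Nat.eq_zero_or_pos j with rfl | hj1
              · rw [List.drop_zero, hz] at hcon
                exact hnone pr hpr hcon
              · obtain ⟨-, -, -, hovl'⟩ := hL pr hpr
                rcases List.prefix_or_prefix_of_prefix hcon (List.prefix_append _ _) with h' | h'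
                · exact (hovl' j hj hj1).1 h'
                · exact (hovl' j hj hj1).2 h'
            have hmB : pvMsc (L ++ [(p, r)]) (c :: t)
                = r ++ pvMsc (L ++ [(p, r)]) z := by
              rw [pvMsc, List.find?_append, hf]
              have : List.find? (fun pr => pr.1.isPrefixOf (c :: t)) [(p, r)] = some (p, r) := by
                simp [List.find?, List.isPrefixOf_iff_prefix.mpr ⟨z, hz⟩]
              rw [Option.none_or, this]
              simp only [dif_neg hp]
              rw [← hz, List.drop_left]
            have hlen : z.length ≤ n := by
              have h1 : p.length ≥ 1 := List.length_pos_iff.mpr hp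
              have := congrArg List.length hz
              simp only [List.length_append, List.length_cons] at this
              simp only [List.length_cons] at hs
              omega
            rw [hmA, hmB, pvRep_head_match p r _ hp, ih _ hlen]
          · have hLHS : pvMsc L (c :: t) = c :: pvMsc L t := by
              rw [pvMsc, hf]
            have hnp : ¬ p <+: (c :: pvMsc L t) := by
              intro hcon
              cases p with
              | nil => exact hp rfl
              | cons d p'' =>
                rw [List.cons_prefix_cons] at hcon
                have hlow'' : ∀ ch ∈ p'', ch.isLower = true :=
                  fun ch hch => hplow ch (by simp [hch])
                have := pvMsc_prefix_low L (fun q hq => (hL q hq).1)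
                  (fun q hq => (hL q hq).2.1) t p'' hlow'' hcon.2
                exact hps (List.cons_prefix_cons.mpr ⟨hcon.1, this⟩)
            have hRHS : pvMsc (L ++ [(p, r)]) (c :: t) = c :: pvMsc (L ++ [(p, r)]) t := by
              rw [pvMsc, List.find?_append, hf]
              have : List.find? (fun pr => pr.1.isPrefixOf (c :: t)) [(p, r)] = none := by
                have hb : p.isPrefixOf (c :: t) = false := by
                  cases hx : p.isPrefixOf (c :: t)
                  · rfl
                  · exact absurd (List.isPrefixOf_iff_prefix.mp hx) hps
                rw [List.find?, hb]
                rfl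
              rw [Option.none_or, this]
            have hlen : t.length ≤ n := by simp only [List.length_cons] at hs; omega
            rw [hLHS, hRHS, pvRep, dif_neg (by
              rintro ⟨-, hpre⟩
              exact hnp (List.isPrefixOf_iff_prefix.mp hpre)), ih _ hlen]
  exact fun s => main s.length s le_rfl

theorem pvFold_eq_msc (T : List (List Char × List Char))
    (hg : ∀ k, k < T.length → pvGoodStep (T.take k) ((T[k]?.getD ([], [])).1)) :
    ∀ s : List Char,
      T.foldl (fun cs r => PySem.Chars.replace cs r.1 r.2) s = pvMsc T s := by
  induction T using List.reverseRecOn with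
  | nil => intro s; rw [List.foldl_nil, pvMsc_nil_tab]
  | append_singleton T' x ih =>
    obtain ⟨p, r⟩ := x
    intro s
    have hgood : pvGoodStep T' p := by
      have := hg T'.length (by simp)
      rw [List.take_left, List.getElem?_concat_length] at this
      simpa using this
    rw [List.foldl_append, List.foldl_cons, List.foldl_nil]
    rw [ih (fun k hk => by
      have := hg k (by simp; omega)
      rwa [List.take_append_of_le_length (le_of_lt hk),
        List.getElem?_append_left hk] at this)]
    rw [pvReplace_eq_rep _ _ _ hgood.1, pvStep T' p r hgood s]

theorem pvStrFold_toList (T : List (String × String)) (s : String) :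
    (T.foldl (fun s r => PySem.Str.replace s r.1 r.2) s).toList
      = (T.map (fun r => (r.1.toList, r.2.toList))).foldl
          (fun cs r => PySem.Chars.replace cs r.1 r.2) s.toList := by
  induction T generalizing s with
  | nil => simp
  | cons x T' ih =>
    rw [List.foldl_cons, ih, List.map_cons, List.foldl_cons, PySem.Str.toList_replace]

-- ===== VERDICT (by name: the statement is the Claim_ definition above) =====
set_option maxRecDepth 100000 in
theorem replacemonth_spec : Claim_equal_replacemonth := by
  intro string _
  show replacemonth string = replacemonth_alt string
  have hA : (replacemonth string).toList
      = pvMsc (pvMonthsA.map (fun r => (r.1.toList, r.2.toList))) string.toList := by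
    rw [replacemonth, pvStrFold_toList, pvFold_eq_msc _ (by
      intro k hk
      have hk' : k < 12 := by simpa [pvMonthsA] using hk
      apply pvGoodStep_of_b
      interval_cases k <;> decide)]
  have hB : replacemonth_alt string
      = String.ofList (pvMsc (pvMonthsB.map (fun r => (r.1.toList, r.2.toList))) string.toList) := by
    rw [replacemonth_alt, pvSubGo_eq_msc _ (by decide) _ _ le_rfl]
  have htab : pvMonthsB.map (fun r => (r.1.toList, r.2.toList))
      = pvMonthsA.map (fun r => (r.1.toList, r.2.toList)) := rfl
  rw [hB, htab, ← hA, String.ofList_toList]
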